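-- pv_equiv track=rewrite | github.com/olivieshek/problems_and_solutions | vasya_grades.py | count_presents
-- ===== SOURCE A (Python) =====
-- def count_presents(num_of_grades: int, grades: list) -> int:
--     good_grades = []
--     presents = 0
--     for gr in grades:
--         if gr == 4 or gr == 5:
--             good_grades.append(gr)
--             if len(good_grades) == 3:
--                 presents += 1
--                 good_grades = []
--         else:
--             good_grades = []
--     return presents
-- ===== SOURCE B (Python) =====
-- def count_presents(num_of_grades: int, grades: list) -> int:
--     good = [g == 4 or g == 5 for g in grades] + [False]
--     prev = [False] + good
--     starts = [i for i, (p, c) in enumerate(zip(prev, good)) if c and not p]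
--     ends = [i for i, (p, c) in enumerate(zip(prev, good)) if p and not c]
--     return sum((e - s) // 3 for s, e in zip(starts, ends))
-- ===== Notes on version B (the rewrite author's own statement) =====
-- stated objective: alternative
-- what changed: Replaces A's stateful scan (a buffer of good grades, reset at length 3, bumping a counter inline) by a stateless staged pipeline: mark good grades, detect run start/end boundaries by comparing each position with its predecessor, pair the boundary indices with zip, and sum (end-start)//3 per run in closed form.
import Mathlib
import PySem

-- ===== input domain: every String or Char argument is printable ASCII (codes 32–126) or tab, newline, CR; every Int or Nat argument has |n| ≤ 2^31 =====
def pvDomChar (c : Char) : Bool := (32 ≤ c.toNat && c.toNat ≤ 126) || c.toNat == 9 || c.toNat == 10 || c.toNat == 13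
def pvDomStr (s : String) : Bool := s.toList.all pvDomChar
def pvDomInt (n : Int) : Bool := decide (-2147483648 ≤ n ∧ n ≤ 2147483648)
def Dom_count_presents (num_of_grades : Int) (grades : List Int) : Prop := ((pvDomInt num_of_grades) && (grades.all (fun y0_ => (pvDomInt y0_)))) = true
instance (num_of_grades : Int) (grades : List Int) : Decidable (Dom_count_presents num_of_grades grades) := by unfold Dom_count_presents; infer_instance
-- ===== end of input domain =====

-- B replaces A's stateful scan (a buffer of good grades reset at length 3) by a staged, stateless
-- computation: mark good grades, locate run boundaries by comparing each position with its
-- predecessor, pair up start/end indices, and sum (end-start)//3 (objective: alternative).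

-- ===== PORT A =====
-- state: (good_grades, presents), exactly A's loop
def count_presents_loopA : List Int → List Int × Int → List Int × Int
  | [], st => st
  | gr :: rest, (good_grades, presents) =>
    if gr == 4 || gr == 5 then
      let good_grades' := good_grades ++ [gr]
      if good_grades'.length == 3 then
        count_presents_loopA rest ([], presents + 1)
      else
        count_presents_loopA rest (good_grades', presents)
    else
      count_presents_loopA rest ([], presents)

def count_presents (num_of_grades : Int) (grades : List Int) : Int :=
  (count_presents_loopA grades ([], 0)).2

-- ===== PORT B =====
def count_presents_alt (num_of_grades : Int) (grades : List Int) : Int :=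
  let good : List Bool := (grades.map (fun g => g == 4 || g == 5)) ++ [false]
  let prev : List Bool := false :: good
  let pairs := PySem.List.enumerate (prev.zip good) 0
  let starts : List Int := (pairs.filter (fun x => x.2.2 && !x.2.1)).map (fun x => x.1)
  let ends : List Int := (pairs.filter (fun x => x.2.1 && !x.2.2)).map (fun x => x.1)
  ((starts.zip ends).map (fun se => PySem.Int.floordiv (se.2 - se.1) 3)).sum

-- ===== PRECONDITION & SPEC =====
def Spec_count_presents (num_of_grades : Int) (grades : List Int) (out : Int) : Prop := out = count_presents_alt num_of_grades grades
instance (num_of_grades : Int) (grades : List Int) (out : Int) : Decidable (Spec_count_presents num_of_grades grades out) := by unfold Spec_count_presents; infer_instance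

-- ===== CLAIM (what is proved, stated in full; the proofs are below) =====
def Claim_equal_count_presents : Prop := ∀ (num_of_grades : Int) (grades : List Int), Dom_count_presents num_of_grades grades → Spec_count_presents num_of_grades grades (count_presents num_of_grades grades)

-- ===== LEMMAS AND PROOFS =====

-- Run-start boundary indices of a boolean list, given the previous element p and current index k.
def pvBndS (p : Bool) (k : Int) : List Bool → List Int
  | [] => []
  | c :: t => if c && !p then k :: pvBndS c (k + 1) t else pvBndS c (k + 1) t

-- Run-end boundary indices.
def pvBndE (p : Bool) (k : Int) : List Bool → List Int
  | [] => []
  | c :: t => if p && !c then k :: pvBndE c (k + 1) t else pvBndE c (k + 1) t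

-- Reference count: runs m bs = presents earned, with m good grades pending before bs
-- (an open run at the very end of bs is dropped).
def pvRuns : Nat → List Bool → Nat
  | _, [] => 0
  | m, true :: t => pvRuns (m + 1) t
  | m, false :: t => m / 3 + pvRuns 0 t

def pvSumZip (xs ys : List Int) : Int :=
  ((xs.zip ys).map (fun se => PySem.Int.floordiv (se.2 - se.1) 3)).sum

-- Bridge: B's comprehensions over enumerate(zip(prev, good)) are the boundary lists.
theorem pvBridgeS (bs : List Bool) : ∀ (p : Bool) (k : Int),
    ((PySem.List.enumerate ((p :: bs).zip bs) k).filter (fun x => x.2.2 && !x.2.1)).map (fun x => x.1)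
      = pvBndS p k bs := by
  induction bs with
  | nil => intro p k; simp [pvBndS, PySem.List.enumerate]
  | cons c t ih =>
    intro p k
    simp only [List.zip_cons_cons, PySem.List.enumerate_cons, pvBndS]
    by_cases h : c && !p <;> simp [h, List.filter, ih c (k + 1)]

theorem pvBridgeE (bs : List Bool) : ∀ (p : Bool) (k : Int),
    ((PySem.List.enumerate ((p :: bs).zip bs) k).filter (fun x => x.2.1 && !x.2.2)).map (fun x => x.1)
      = pvBndE p k bs := by
  induction bs with
  | nil => intro p k; simp [pvBndE, PySem.List.enumerate]
  | cons c t ih =>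
    intro p k
    simp only [List.zip_cons_cons, PySem.List.enumerate_cons, pvBndE]
    by_cases h : p && !c <;> simp [h, List.filter, ih c (k + 1)]

theorem pvFloordivNat (m : Nat) : PySem.Int.floordiv (m : Int) 3 = ((m / 3 : Nat) : Int) := by
  exact_mod_cast PySem.Int.floordiv_natCast m 3

-- Core: pairing starts with ends and summing (e - s) // 3 computes pvRuns, both in the
-- "between runs" state (prev = false) and in the "inside a run started m steps ago" state.
theorem pvBoundary (bs : List Bool) :
    (∀ k : Int, pvSumZip (pvBndS false k bs) (pvBndE false k bs) = (pvRuns 0 bs : Int)) ∧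
    (∀ (k : Int) (m : Nat), pvSumZip ((k - m) :: pvBndS true k bs) (pvBndE true k bs) = (pvRuns m bs : Int)) := by
  induction bs with
  | nil =>
    constructor
    · intro k; simp [pvBndS, pvBndE, pvSumZip, pvRuns]
    · intro k m; simp [pvBndS, pvBndE, pvSumZip, pvRuns]
  | cons c t ih =>
    obtain ⟨ihC, ihO⟩ := ih
    constructor
    · intro k
      cases c with
      | false =>
        simp only [pvBndS, pvBndE, pvRuns, Bool.not_true, Bool.not_false, Bool.true_and,
          Bool.false_and, Bool.and_true, Bool.and_false, reduceIte]
        simpa using ihC (k + 1)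
      | true =>
        simp only [pvBndS, pvBndE, pvRuns, Bool.not_true, Bool.not_false, Bool.true_and,
          Bool.false_and, Bool.and_true, Bool.and_false, reduceIte]
        have := ihO (k + 1) 1
        simpa using this
    · intro k m
      cases c with
      | false =>
        simp only [pvBndS, pvBndE, pvRuns]
        rw [if_neg (by decide), if_pos (by decide)]
        have hC := ihC (k + 1)
        simp only [pvSumZip] at hC ⊢
        simp only [List.zip_cons_cons, List.map_cons, List.sum_cons]
        rw [show k - (k - (m : Int)) = (m : Int) from by ring, pvFloordivNat m, hC]
        push_cast; ring
      | true =>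
        simp only [pvBndS, pvBndE, pvRuns, Bool.not_true, Bool.true_and, Bool.and_false, reduceIte]
        have := ihO (k + 1) (m + 1)
        have hk : (k + 1 : Int) - ((m : Nat) + 1 : Nat) = k - m := by push_cast; ring
        rw [hk] at this
        exact this

-- pvRuns with 3 more pending goods on a false-terminated list yields one more present.
theorem pvRuns_add3 (u : List Bool) : ∀ m : Nat, pvRuns (m + 3) (u ++ [false]) = 1 + pvRuns m (u ++ [false]) := by
  induction u with
  | nil => intro m; simp [pvRuns]; omega
  | cons c t ih =>
    intro m
    cases c with
    | true => simpa [pvRuns, Nat.add_right_comm] using ih (m + 1)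
    | false => simp [pvRuns]; omega

-- A's loop invariant: the buffer length (always < 3) is the pending-run counter of pvRuns
-- applied to the good/bad pattern closed by a final sentinel false.
theorem pvLoopA (l : List Int) : ∀ (g : List Int) (p : Int), g.length < 3 →
    (count_presents_loopA l (g, p)).2
      = p + (pvRuns g.length ((l.map (fun g => g == 4 || g == 5)) ++ [false]) : Int) := by
  induction l with
  | nil =>
    intro g p hg
    have : g.length / 3 = 0 := by omega
    simp [count_presents_loopA, pvRuns, this]
  | cons gr rest ih =>
    intro g p hg
    by_cases hgood : gr == 4 || gr == 5
    · simp only [count_presents_loopA, hgood, if_pos, List.map_cons, List.cons_append]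
      by_cases h3 : (g ++ [gr]).length == 3
      · have hl : (g ++ [gr]).length = 3 := by exact_mod_cast (beq_iff_eq.mp h3)
        have hgl : g.length = 2 := by simp at hl; omega
        rw [if_pos h3]
        simp only [pvRuns]
        rw [ih [] (p + 1) (by simp)]
        have := pvRuns_add3 (rest.map (fun g => g == 4 || g == 5)) 0
        simp only [hgl]
        rw [show (2 : Nat) + 1 = 0 + 3 from rfl, this]
        push_cast
        simp [pvRuns]
        ring
      · have hl : (g ++ [gr]).length ≠ 3 := fun h => h3 (by exact_mod_cast beq_iff_eq.mpr h)
        have hlen : (g ++ [gr]).length = g.length + 1 := by simp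
        rw [if_neg h3]
        simp only [pvRuns]
        rw [ih (g ++ [gr]) p (by omega), hlen]
    · simp only [count_presents_loopA, List.map_cons, List.cons_append]
      have hb : (gr == 4 || gr == 5) = false := by simpa using hgood
      rw [if_neg hgood, hb]
      simp only [pvRuns]
      rw [ih [] p (by simp)]
      have : g.length / 3 = 0 := by omega
      simp [this]

-- ===== VERDICT (by name: the statement is the Claim_ definition above) =====
theorem count_presents_spec : Claim_equal_count_presents := by
  intro num_of_grades grades _
  unfold Spec_count_presents count_presents count_presents_alt
  rw [pvLoopA grades [] 0 (by simp)]
  simp only []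
  rw [pvBridgeS, pvBridgeE]
  have := (pvBoundary ((grades.map (fun g => g == 4 || g == 5)) ++ [false])).1 0
  simp only [pvSumZip] at this
  rw [this]
  simp [pvRuns]
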